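-- pv_equiv track=rewrite | github.com/jys96/baekjoon_cote | 프로그래머스/1/340199. ［PCCE 기출문제］ 9번 ／ 지폐 접기/［PCCE 기출문제］ 9번 ／ 지폐 접기.py | rotation_bill
-- ===== SOURCE A (Python) =====
-- def ch_in(wallet, bill):
--     if wallet >= bill:
--         return True
--     else:
--         return False
--
-- def rotation_bill(wallet, bill):
--     result = []
--     for i in range(2):
--         result.append(ch_in(wallet[i], bill[i]))
--
--     if False in result:
--         result = []
--         result.append(ch_in(wallet[0], bill[1]))
--         result.append(ch_in(wallet[1], bill[0]))
--
--         if False in result: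
--             return False
--         else:
--             return True
--     else:
--         return True
-- ===== SOURCE B (Python) =====
-- def rotation_bill(wallet, bill):
--     w0, w1 = wallet[0], wallet[1]
--     b0, b1 = bill[0], bill[1]
--     return min(w0, w1) >= min(b0, b1) and max(w0, w1) >= max(b0, b1)
-- ===== Notes on version B (the rewrite author's own statement) =====
-- stated objective: simpler
-- what changed: Replaces the helper, the range(2) loop, the result lists and the two False-membership tests with a single min/max comparison of the two dimensions, which is equivalent to checking both orientations.
import Mathlib
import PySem

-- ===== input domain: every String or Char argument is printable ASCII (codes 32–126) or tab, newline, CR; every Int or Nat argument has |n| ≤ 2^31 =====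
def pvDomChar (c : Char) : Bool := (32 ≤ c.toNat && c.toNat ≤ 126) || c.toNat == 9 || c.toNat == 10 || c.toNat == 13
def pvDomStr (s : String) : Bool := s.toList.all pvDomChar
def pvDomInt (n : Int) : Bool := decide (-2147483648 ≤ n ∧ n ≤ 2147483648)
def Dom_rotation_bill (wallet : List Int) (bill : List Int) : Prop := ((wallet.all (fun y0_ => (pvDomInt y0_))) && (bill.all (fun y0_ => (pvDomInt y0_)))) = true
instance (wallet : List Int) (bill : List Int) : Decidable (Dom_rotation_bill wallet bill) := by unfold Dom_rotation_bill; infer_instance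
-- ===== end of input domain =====

-- B replaces A's loop, result lists and two False-membership tests with a single min/max
-- comparison of the two dimensions (objective: simpler).

-- ===== PORT A =====
def ch_in (wallet : Int) (bill : Int) : Bool :=
  if wallet ≥ bill then true else false

def rotation_bill (wallet : List Int) (bill : List Int) : Bool :=
  -- for i in range(2): result.append(ch_in(wallet[i], bill[i]))
  let result := (PySem.List.pyRange 0 2 1).foldl (fun acc i =>
    acc ++ [ch_in ((PySem.List.pyGet? wallet i).getD 0) ((PySem.List.pyGet? bill i).getD 0)]) []
  if result.contains false then
    let result := ([] : List Bool)
      ++ [ch_in ((PySem.List.pyGet? wallet 0).getD 0) ((PySem.List.pyGet? bill 1).getD 0)]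
      ++ [ch_in ((PySem.List.pyGet? wallet 1).getD 0) ((PySem.List.pyGet? bill 0).getD 0)]
    if result.contains false then false else true
  else true

-- ===== PORT B =====
def rotation_bill_alt (wallet : List Int) (bill : List Int) : Bool :=
  let w0 := (PySem.List.pyGet? wallet 0).getD 0
  let w1 := (PySem.List.pyGet? wallet 1).getD 0
  let b0 := (PySem.List.pyGet? bill 0).getD 0
  let b1 := (PySem.List.pyGet? bill 1).getD 0
  decide (min w0 w1 ≥ min b0 b1) && decide (max w0 w1 ≥ max b0 b1)

-- ===== PRECONDITION & SPEC =====
-- A raises IndexError unless both lists have at least two elements.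
def Pre_rotation_bill (wallet : List Int) (bill : List Int) : Prop :=
  2 ≤ wallet.length ∧ 2 ≤ bill.length
instance (wallet : List Int) (bill : List Int) : Decidable (Pre_rotation_bill wallet bill) := by
  unfold Pre_rotation_bill; infer_instance

def pvWitness_rotation_bill : List Int × List Int := ([10, 20], [15, 8])

def Spec_rotation_bill (wallet : List Int) (bill : List Int) (out : Bool) : Prop := out = rotation_bill_alt wallet bill
instance (wallet : List Int) (bill : List Int) (out : Bool) : Decidable (Spec_rotation_bill wallet bill out) := by unfold Spec_rotation_bill; infer_instance

-- ===== CLAIM (what is proved, stated in full; the proofs are below) =====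
def Claim_equal_rotation_bill : Prop := ∀ (wallet : List Int) (bill : List Int), Dom_rotation_bill wallet bill → Pre_rotation_bill wallet bill → Spec_rotation_bill wallet bill (rotation_bill wallet bill)

-- ===== LEMMAS AND PROOFS =====
theorem pv_pyget_one (x y : Int) (zs : List Int) :
    PySem.List.pyGet? (x :: y :: zs) 1 = some y := by
  rw [show (1 : Int) = (((0 : Nat) : Int) + 1) by norm_num, PySem.List.pyGet?_cons_succ]
  exact PySem.List.pyGet?_zero_cons y zs

theorem rotation_bill_core (w0 w1 b0 b1 : Int) (ws bs : List Int) :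
    rotation_bill (w0 :: w1 :: ws) (b0 :: b1 :: bs)
      = rotation_bill_alt (w0 :: w1 :: ws) (b0 :: b1 :: bs) := by
  have hr : PySem.List.pyRange 0 2 1 = [0, 1] := by decide
  simp only [rotation_bill, rotation_bill_alt, hr, List.foldl, List.nil_append,
    PySem.List.pyGet?_zero_cons, pv_pyget_one, Option.getD_some, ch_in]
  by_cases h00 : b0 ≤ w0 <;> by_cases h11 : b1 ≤ w1 <;>
    by_cases h01 : b1 ≤ w0 <;> by_cases h10 : b0 ≤ w1 <;>
      simp_all [ge_iff_le] <;> omega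

-- ===== VERDICT (by name: the statement is the Claim_ definition above) =====
theorem rotation_bill_spec : Claim_equal_rotation_bill := by
  intro wallet bill _ hpre
  unfold Spec_rotation_bill
  match wallet, bill, hpre with
  | w0 :: w1 :: ws, b0 :: b1 :: bs, _ => exact rotation_bill_core w0 w1 b0 b1 ws bs
  | [], _, h => simp [Pre_rotation_bill] at h
  | [_], _, h => simp [Pre_rotation_bill] at h
  | _ :: _ :: _, [], h => simp [Pre_rotation_bill] at h
  | _ :: _ :: _, [_], h => simp [Pre_rotation_bill] at h
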